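-- pv_equiv track=rewrite | github.com/Yorly16/finaldata | species_processor.py | _extract_islands_presence
-- ===== SOURCE A (Python) =====
-- def _extract_islands_presence(row):
--     """Extrae información de presencia en islas del CSV"""
--     islands = [
--         'Baltra', 'Bartolome', 'Darwin', 'Espanola', 'Fernandina',
--         'Floreana', 'Genovesa', 'Isabela', 'Marchena', 'Pinta',
--         'Pinzon', 'Rabida', 'San Cristobal', 'Santa Cruz', 'Santa Fe',
--         'Santiago', 'Wolf'
--     ]
--
--     present_islands = []
--
--     for island in islands:
--         # Buscar columnas que contengan el nombre de la isla
--         for column_name, value in row.items():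
--             if island.lower() in column_name.lower():
--                 # Si el valor indica presencia (True, 1, 'Yes', 'Sí', etc.)
--                 if str(value).lower() in ['true', '1', 'yes', 'sí', 'si', 'x']:
--                     present_islands.append(island)
--                 break
--
--     return ', '.join(present_islands) if present_islands else 'No disponible'
-- ===== SOURCE B (Python) =====
-- def _extract_islands_presence(row):
--     """Extrae información de presencia en islas del CSV"""
--     islands = [
--         'Baltra', 'Bartolome', 'Darwin', 'Espanola', 'Fernandina',
--         'Floreana', 'Genovesa', 'Isabela', 'Marchena', 'Pinta',
--         'Pinzon', 'Rabida', 'San Cristobal', 'Santa Cruz', 'Santa Fe',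
--         'Santiago', 'Wolf'
--     ]
--     tokens = {'true', '1', 'yes', 'sí', 'si', 'x'}
--
--     # One forward pass: record, for each island, the value of the FIRST
--     # column whose name contains the island's name (never overwrite).
--     first_value = {}
--     for column_name, value in row.items():
--         cl = column_name.lower()
--         for island in islands:
--             if island not in first_value and island.lower() in cl:
--                 first_value[island] = value
--
--     present_islands = [
--         island for island in islands
--         if island in first_value and str(first_value[island]).lower() in tokens
--     ]
--     return ', '.join(present_islands) if present_islands else 'No disponible'
-- ===== Notes on version B (the rewrite author's own statement) =====
-- stated objective: alternative
-- what changed: Replaces the per-island rescan of all columns by a single forward pass over the row that records each island's first matching column value in a dict, followed by an ordered emit over the island list.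
import Mathlib
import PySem

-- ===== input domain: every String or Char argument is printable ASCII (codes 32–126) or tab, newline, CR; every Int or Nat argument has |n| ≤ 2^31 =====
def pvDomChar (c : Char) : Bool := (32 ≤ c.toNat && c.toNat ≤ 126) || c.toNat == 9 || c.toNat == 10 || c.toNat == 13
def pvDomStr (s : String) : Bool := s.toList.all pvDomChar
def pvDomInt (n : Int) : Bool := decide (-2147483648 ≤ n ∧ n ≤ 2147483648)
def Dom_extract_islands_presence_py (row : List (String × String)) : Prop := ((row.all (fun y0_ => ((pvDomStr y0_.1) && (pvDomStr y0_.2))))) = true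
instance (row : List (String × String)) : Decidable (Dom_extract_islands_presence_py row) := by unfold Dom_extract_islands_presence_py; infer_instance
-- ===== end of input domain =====

-- B replaces A's per-island rescan of the row by one forward pass that records each
-- island's first matching column value in a dict, then one ordered emit (alternative).

def pvIslands : List String :=
  ["Baltra", "Bartolome", "Darwin", "Espanola", "Fernandina",
   "Floreana", "Genovesa", "Isabela", "Marchena", "Pinta",
   "Pinzon", "Rabida", "San Cristobal", "Santa Cruz", "Santa Fe",
   "Santiago", "Wolf"]

def pvTokens : List String := ["true", "1", "yes", "sí", "si", "x"]

-- ===== PORT A =====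
-- A's inner 'for column_name, value in row.items(): … break' loop for one island.
def pvAInner (island : String) (row : List (String × String)) (acc : List String) : List String :=
  match row with
  | [] => acc
  | (cn, v) :: rest =>
    if PySem.Str.isIn (PySem.Str.lower island) (PySem.Str.lower cn) then
      (if pvTokens.contains (PySem.Str.lower v) then acc ++ [island] else acc)
    else pvAInner island rest acc

def extract_islands_presence_py (row : List (String × String)) : String :=
  let present := pvIslands.foldl (fun acc island => pvAInner island row acc) []
  if present ≠ [] then PySem.Str.join ", " present else "No disponible"

-- ===== PORT B =====
-- B's single forward pass building the island -> first matching column value dict.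
def pvBScan (row : List (String × String)) (found : PySem.Dict String String) : PySem.Dict String String :=
  match row with
  | [] => found
  | (cn, v) :: rest =>
    let cl := PySem.Str.lower cn
    pvBScan rest (pvIslands.foldl
      (fun f island =>
        if !(f.contains island) && PySem.Str.isIn (PySem.Str.lower island) cl
        then f.insert island v else f) found)

def extract_islands_presence_py_alt (row : List (String × String)) : String :=
  let found := pvBScan row PySem.Dict.empty
  let present := pvIslands.filter (fun island =>
    match found.get? island with
    | some v => pvTokens.contains (PySem.Str.lower v)
    | none => false)
  if present ≠ [] then PySem.Str.join ", " present else "No disponible"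

-- ===== PRECONDITION & SPEC =====
def Spec_extract_islands_presence_py (row : List (String × String)) (out : String) : Prop := out = extract_islands_presence_py_alt row
instance (row : List (String × String)) (out : String) : Decidable (Spec_extract_islands_presence_py row out) := by unfold Spec_extract_islands_presence_py; infer_instance

-- ===== CLAIM (what is proved, stated in full; the proofs are below) =====
def Claim_equal_extract_islands_presence_py : Prop := ∀ (row : List (String × String)), Dom_extract_islands_presence_py row → Spec_extract_islands_presence_py row (extract_islands_presence_py row)

-- ===== LEMMAS AND PROOFS =====

-- value of the first column whose (lowercased) name contains the island's lowercased name
def pvFirst (island : String) (row : List (String × String)) : Option String :=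
  (row.find? (fun p => PySem.Str.isIn (PySem.Str.lower island) (PySem.Str.lower p.1))).map (·.2)

lemma pvAInner_eq (island : String) (row : List (String × String)) (acc : List String) :
    pvAInner island row acc =
      acc ++ (match pvFirst island row with
              | some v => if pvTokens.contains (PySem.Str.lower v) then [island] else []
              | none => []) := by
  induction row generalizing acc with
  | nil => simp [pvAInner, pvFirst]
  | cons p rest ih =>
    obtain ⟨cn, v⟩ := p
    by_cases h : PySem.Str.isIn (PySem.Str.lower island) (PySem.Str.lower cn) = true
    · have h2 : PySem.Chars.isIn (PySem.Chars.lower island.toList) (PySem.Chars.lower cn.toList) = true := by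
        simpa [PySem.Str.isIn, PySem.Str.toList_lower] using h
      simp [pvAInner, pvFirst, h2, List.find?]
      split <;> simp
    · have h' : PySem.Chars.isIn (PySem.Chars.lower island.toList) (PySem.Chars.lower cn.toList) = false := by
        rw [Bool.eq_false_iff]
        intro hc
        exact h (by simp [PySem.Str.isIn, PySem.Str.toList_lower, hc])
      simp only [pvAInner, pvFirst] at *
      simp [h', ih]

lemma pvFoldl_insert_get? (l : List String) (f : PySem.Dict String String)
    (cond : String → Bool) (v : String) (i : String) :
    ((l.foldl (fun f j => if !(f.contains j) && cond j then f.insert j v else f) f).get? i)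
      = if i ∈ l ∧ f.contains i = false ∧ cond i = true then some v else f.get? i := by
  induction l generalizing f with
  | nil => simp
  | cons j rest ih =>
    rw [List.foldl_cons]
    by_cases hcase : (!(f.contains j) && cond j) = true
    · have hj : f.contains j = false ∧ cond j = true := by
        simpa [Bool.and_eq_true, Bool.not_eq_true'] using hcase
      rw [if_pos hcase, ih]
      by_cases hji : j = i
      · subst hji
        have hget : (f.insert j v).get? j = some v := PySem.Dict.get?_insert_self _ _ _
        have hco : (f.insert j v).contains j = true := by
          rw [PySem.Dict.contains_eq_isSome_get?, hget]; rfl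
        rw [if_neg (by simp [hco]), if_pos ⟨List.mem_cons_self, hj.1, hj.2⟩]
        exact hget
      · have hij : i ≠ j := fun h => hji h.symm
        have h1 : (f.insert j v).get? i = f.get? i := PySem.Dict.get?_insert_of_ne f v hij
        have h2 : (f.insert j v).contains i = f.contains i := by
          rw [PySem.Dict.contains_eq_isSome_get?, PySem.Dict.contains_eq_isSome_get?, h1]
        rw [h1, h2]
        simp [List.mem_cons, hij]
    · have hj' : ¬(f.contains j = false ∧ cond j = true) := by
        intro h
        exact hcase (by simp [h.1, h.2])
      rw [if_neg hcase, ih]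
      by_cases hX : f.contains i = false ∧ cond i = true
      · by_cases hji : j = i
        · subst hji; exact absurd hX hj'
        · simp [List.mem_cons, hX.1, hX.2, show i ≠ j from fun h => hji h.symm]
      · rw [if_neg (fun h => hX ⟨h.2.1, h.2.2⟩), if_neg (fun h => hX ⟨h.2.1, h.2.2⟩)]

lemma pvBScan_get? (row : List (String × String)) (found : PySem.Dict String String)
    (i : String) (hi : i ∈ pvIslands) :
    (pvBScan row found).get? i =
      match found.get? i with
      | some v => some v
      | none => pvFirst i row := by
  induction row generalizing found with
  | nil =>
    show found.get? i = _
    cases h : found.get? i <;> simp [pvFirst, h]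
  | cons p rest ih =>
    obtain ⟨cn, v⟩ := p
    simp only [pvBScan]
    rw [ih]
    rw [pvFoldl_insert_get?]
    by_cases hf : found.contains i = true
    · have : ∃ w, found.get? i = some w := by
        rw [PySem.Dict.contains_eq_isSome_get?] at hf
        exact Option.isSome_iff_exists.mp hf
      obtain ⟨w, hw⟩ := this
      simp [hf, hw]
    · simp only [Bool.not_eq_true] at hf
      have hnone : found.get? i = none := by
        cases h : found.get? i with
        | none => rfl
        | some w => rw [PySem.Dict.contains_eq_isSome_get?, h] at hf; simp at hf
      by_cases hm : PySem.Str.isIn (PySem.Str.lower i) (PySem.Str.lower cn) = true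
      · have hm' : PySem.Chars.isIn (PySem.Chars.lower i.toList) (PySem.Chars.lower cn.toList) = true := by
          simpa [PySem.Str.isIn, PySem.Str.toList_lower] using hm
        simp [hi, hf, hm', hnone, pvFirst, List.find?]
      · have hm' : PySem.Chars.isIn (PySem.Chars.lower i.toList) (PySem.Chars.lower cn.toList) = false := by
          rw [Bool.eq_false_iff]
          intro hc
          exact hm (by simp [PySem.Str.isIn, PySem.Str.toList_lower, hc])
        simp [hf, hnone, pvFirst, List.find?, hm']

lemma pvA_foldl_eq (row : List (String × String)) :
    pvIslands.foldl (fun acc island => pvAInner island row acc) [] =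
      pvIslands.filter (fun island =>
        match pvFirst island row with
        | some v => pvTokens.contains (PySem.Str.lower v)
        | none => false) := by
  have h : ∀ (l : List String) (acc : List String),
      l.foldl (fun acc island => pvAInner island row acc) acc =
        acc ++ l.filter (fun island =>
          match pvFirst island row with
          | some v => pvTokens.contains (PySem.Str.lower v)
          | none => false) := by
    intro l
    induction l with
    | nil => simp
    | cons x xs ih =>
      intro acc
      rw [List.foldl_cons, pvAInner_eq, ih, List.filter_cons, List.append_assoc]
      cases hx : pvFirst x row with
      | none => simp [hx]
      | some v => by_cases ht : PySem.Str.lower v ∈ pvTokens <;> simp [hx, ht]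
  simpa using h pvIslands []

-- ===== VERDICT (by name: the statement is the Claim_ definition above) =====
theorem extract_islands_presence_py_spec : Claim_equal_extract_islands_presence_py := by
  intro row _
  unfold Spec_extract_islands_presence_py extract_islands_presence_py extract_islands_presence_py_alt
  have hfilter :
      pvIslands.filter (fun island =>
        match (pvBScan row PySem.Dict.empty).get? island with
        | some v => pvTokens.contains (PySem.Str.lower v)
        | none => false) =
      pvIslands.filter (fun island =>
        match pvFirst island row with
        | some v => pvTokens.contains (PySem.Str.lower v)
        | none => false) := by
    apply List.filter_congr
    intro i hi
    rw [pvBScan_get? row _ i hi]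
    simp [PySem.Dict.get?_empty]
  rw [pvA_foldl_eq, ← hfilter]
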